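-- pv_equiv track=rewrite | github.com/SKNETWORKS-FAMILY-AICAMP/SKN21-FINAL-5TEAM | chatbot/src/onboarding/patch_planner.py | _find_auth_view_insert_index
-- ===== SOURCE A (Python) =====
-- def _find_auth_view_insert_index(lines: list[str]) -> int | None:
--     auth_function_names = {"login", "me", "logout", "signup", "signin", "session", "refresh"}
--     candidate_index: int | None = None
--
--     for index, line in enumerate(lines):
--         stripped = line.strip()
--         if not stripped.startswith("def "):
--             continue
--
--         function_name = stripped[4:].split("(", 1)[0].strip()
--         if function_name not in auth_function_names:
--             continue
--
--         candidate_index = _find_function_end_index(lines, start_index=index)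
--
--     return candidate_index
--
-- def _find_function_end_index(lines: list[str], *, start_index: int) -> int:
--     for index in range(start_index + 1, len(lines)):
--         stripped = lines[index].strip()
--         if stripped.startswith("def ") or stripped.startswith("class "):
--             return index
--     return len(lines)
-- ===== SOURCE B (Python) =====
-- def _find_auth_view_insert_index(lines: list[str]) -> int | None:
--     auth_function_names = {"login", "me", "logout", "signup", "signin", "session", "refresh"}
--
--     # Phase 1: scan backwards for the LAST auth view def.
--     last_auth_index = None
--     for index in range(len(lines) - 1, -1, -1):
--         stripped = lines[index].strip()
--         if stripped.startswith("def ") and stripped[4:].split("(", 1)[0].strip() in auth_function_names: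
--             last_auth_index = index
--             break
--
--     if last_auth_index is None:
--         return None
--
--     # Phase 2: one forward scan past that def for the next def/class header.
--     for index in range(last_auth_index + 1, len(lines)):
--         stripped = lines[index].strip()
--         if stripped.startswith("def ") or stripped.startswith("class "):
--             return index
--     return len(lines)
-- ===== Notes on version B (the rewrite author's own statement) =====
-- stated objective: alternative
-- what changed: Instead of scanning forward and recomputing the function-end index for every auth def encountered, B scans backwards to find the last auth def first and then performs a single forward scan for the next def/class header.
import Mathlib
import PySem

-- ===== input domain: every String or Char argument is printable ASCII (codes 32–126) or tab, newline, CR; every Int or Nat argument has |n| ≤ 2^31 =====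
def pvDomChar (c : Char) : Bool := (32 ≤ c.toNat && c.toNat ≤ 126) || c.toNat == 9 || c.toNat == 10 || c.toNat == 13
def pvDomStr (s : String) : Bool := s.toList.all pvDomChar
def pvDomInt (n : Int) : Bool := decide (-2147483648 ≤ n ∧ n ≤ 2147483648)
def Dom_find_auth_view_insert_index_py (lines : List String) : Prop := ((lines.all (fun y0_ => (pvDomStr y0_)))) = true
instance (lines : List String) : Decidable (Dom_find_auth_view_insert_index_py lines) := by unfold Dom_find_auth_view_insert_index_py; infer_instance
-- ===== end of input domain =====

-- B restructures the search (backward scan for the last auth def, then one forward scan)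
-- instead of A's forward scan that recomputes an end index at every auth def; return values are equal.

-- ===== PORT A =====
def pvAuthNames : List String := ["login", "me", "logout", "signup", "signin", "session", "refresh"]

-- function_name = stripped[4:].split("(", 1)[0].strip()   (split on nonempty sep is some, and nonempty; defaults unreachable)
def pvParsedName (stripped : String) : String :=
  PySem.Str.strip ((((PySem.Str.splitMax? (PySem.Str.slice stripped (some 4) none) "(" 1).getD []).headD ""))

-- _find_function_end_index's loop over range(start_index+1, len(lines)); lines[index] is always in range there
def pvEndLoop (lines : List String) : List Int → Int
  | [] => (lines.length : Int)
  | i :: rest =>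
    let stripped := PySem.Str.strip (PySem.List.pyGetD lines i "")
    if PySem.Str.startswith stripped "def " || PySem.Str.startswith stripped "class " then i
    else pvEndLoop lines rest

def find_function_end_index (lines : List String) (start_index : Int) : Int :=
  pvEndLoop lines (PySem.List.pyRange (start_index + 1) (lines.length : Int) 1)

def find_auth_view_insert_index_py (lines : List String) : Option Int :=
  (PySem.List.enumerate lines 0).foldl
    (fun candidate p =>
      let stripped := PySem.Str.strip p.2
      if !(PySem.Str.startswith stripped "def ") then candidate
      else if !(pvAuthNames.contains (pvParsedName stripped)) then candidate
      else some (find_function_end_index lines p.1))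
    none

-- ===== PORT B =====
def pvIsAuthDef (line : String) : Bool :=
  let stripped := PySem.Str.strip line
  PySem.Str.startswith stripped "def " && pvAuthNames.contains (pvParsedName stripped)

-- B's backward loop over range(len(lines)-1, -1, -1); lines[index] always in range
def pvRevFind (lines : List String) : List Int → Option Int
  | [] => none
  | i :: rest =>
    if pvIsAuthDef (PySem.List.pyGetD lines i "") then some i else pvRevFind lines rest

-- B's forward loop over range(last+1, len(lines)); lines[index] always in range
def pvFwdLoop (lines : List String) : List Int → Int
  | [] => (lines.length : Int)
  | i :: rest =>
    let stripped := PySem.Str.strip (PySem.List.pyGetD lines i "")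
    if PySem.Str.startswith stripped "def " || PySem.Str.startswith stripped "class " then i
    else pvFwdLoop lines rest

def find_auth_view_insert_index_py_alt (lines : List String) : Option Int :=
  match pvRevFind lines (PySem.List.pyRange ((lines.length : Int) - 1) (-1) (-1)) with
  | none => none
  | some last => some (pvFwdLoop lines (PySem.List.pyRange (last + 1) (lines.length : Int) 1))

-- ===== PRECONDITION & SPEC =====
def Spec_find_auth_view_insert_index_py (lines : List String) (out : Option Int) : Prop := out = find_auth_view_insert_index_py_alt lines
instance (lines : List String) (out : Option Int) : Decidable (Spec_find_auth_view_insert_index_py lines out) := by unfold Spec_find_auth_view_insert_index_py; infer_instance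

-- ===== CLAIM (what is proved, stated in full; the proofs are below) =====
def Claim_equal_find_auth_view_insert_index_py : Prop := ∀ (lines : List String), Dom_find_auth_view_insert_index_py lines → Spec_find_auth_view_insert_index_py lines (find_auth_view_insert_index_py lines)

-- ===== LEMMAS AND PROOFS =====

-- A's loop body is the guarded-update form
theorem pvA_foldl_body (lines : List String) :
    find_auth_view_insert_index_py lines =
      (PySem.List.enumerate lines 0).foldl
        (fun candidate p => if pvIsAuthDef p.2 then some (find_function_end_index lines p.1) else candidate)
        none := by
  have hfun : (fun (candidate : Option Int) (p : Int × String) =>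
      let stripped := PySem.Str.strip p.2
      if !(PySem.Str.startswith stripped "def ") then candidate
      else if !(pvAuthNames.contains (pvParsedName stripped)) then candidate
      else some (find_function_end_index lines p.1))
    = (fun candidate p =>
        if pvIsAuthDef p.2 then some (find_function_end_index lines p.1) else candidate) := by
    funext candidate p
    simp only [pvIsAuthDef]
    by_cases h1 : PySem.Str.startswith (PySem.Str.strip p.2) "def " <;>
      by_cases h2 : pvAuthNames.contains (pvParsedName (PySem.Str.strip p.2)) <;>
        simp_all
  unfold find_auth_view_insert_index_py
  rw [hfun]

-- guarded-update foldl computes from the LAST satisfying element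
theorem pv_foldl_last {α : Type} (c : α → Bool) (E : Int → Option Int) :
    ∀ (ys : List (Int × α)) (init : Option Int),
      ys.foldl (fun acc p => if c p.2 then E p.1 else acc) init =
        match (ys.reverse.find? (fun p => c p.2)) with
        | some q => E q.1
        | none => init := by
  intro ys
  induction ys using List.reverseRecOn with
  | nil => intro init; simp
  | append_singleton zs p ih =>
    intro init
    rw [List.foldl_append]
    by_cases h : c p.2 <;> simp [h, ih]

-- B's backward loop is find? on the index list
theorem pvRevFind_eq_find? (lines : List String) (l : List Int) :
    pvRevFind lines l = l.find? (fun i => pvIsAuthDef (PySem.List.pyGetD lines i "")) := by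
  induction l with
  | nil => rfl
  | cons i rest ih =>
    by_cases h : pvIsAuthDef (PySem.List.pyGetD lines i "") <;> simp [pvRevFind, h, ih, List.find?]

-- the two body-scanning loops are the same recursion
theorem pvFwd_eq_End (lines : List String) (l : List Int) :
    pvFwdLoop lines l = pvEndLoop lines l := by
  induction l with
  | nil => rfl
  | cons i rest ih => simp only [pvFwdLoop, pvEndLoop, ih]

-- ===== VERDICT (by name: the statement is the Claim_ definition above) =====
theorem find_auth_view_insert_index_py_spec : Claim_equal_find_auth_view_insert_index_py := by
  intro lines _
  show find_auth_view_insert_index_py lines = find_auth_view_insert_index_py_alt lines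
  rw [pvA_foldl_body,
      pv_foldl_last (fun line => pvIsAuthDef line) (fun i => some (find_function_end_index lines i))]
  unfold find_auth_view_insert_index_py_alt
  rw [pvRevFind_eq_find?]
  have hrange : PySem.List.pyRange ((lines.length : Int) - 1) (-1) (-1)
      = (PySem.List.pyRange 0 (lines.length : Int) 1).reverse := by
    rw [PySem.List.pyRange_neg_one_eq_reverse]; norm_num
  rw [hrange]
  have henum : PySem.List.enumerate lines 0
      = (PySem.List.pyRange 0 (lines.length : Int) 1).map
          (fun j => (j, PySem.List.pyGetD lines j "")) := by
    simpa using PySem.List.enumerate_eq_map_pyRange lines ""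
  rw [henum, ← List.map_reverse, List.find?_map]
  cases hf : (PySem.List.pyRange 0 (lines.length : Int) 1).reverse.find?
      (fun i => pvIsAuthDef (PySem.List.pyGetD lines i "")) with
  | none => simp only [Function.comp_def] at *; rw [hf]; rfl
  | some i =>
    simp only [Function.comp_def] at *
    rw [hf]
    simp [pvFwd_eq_End, find_function_end_index]
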